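-- pv_equiv track=rewrite | github.com/MatthewHird/csci461 | Labs/Lab3/VirtualTimerGenerator/src/vt_gen.py | _get_gaps_destructive
-- ===== SOURCE A (Python) =====
-- from typing import List
--
-- def _get_gaps_destructive(int_list: List[int], gap_list: List[int]) -> List[int]:
--     if len(int_list) == 1:
--         return gap_list
--     elif len(int_list) > 1:
--         gap_list.append(int_list[1] - int_list[0])
--         int_list.pop(0)
--         return _get_gaps_destructive(int_list, gap_list)
--     else:
--         raise ValueError
-- ===== SOURCE B (Python) =====
-- from typing import List
--
-- def _get_gaps_destructive(int_list: List[int], gap_list: List[int]) -> List[int]: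
--     if not int_list:
--         raise ValueError
--     gap_list.extend(b - a for a, b in zip(int_list, int_list[1:]))
--     del int_list[:-1]
--     return gap_list
-- ===== Notes on version B (the rewrite author's own statement) =====
-- stated objective: simpler
-- what changed: Replaces the element-at-a-time tail recursion with pop(0) by one bulk zip of the list with its tail extended onto gap_list (same in-place effects: gap_list extended, int_list truncated to its last element).
import Mathlib
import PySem

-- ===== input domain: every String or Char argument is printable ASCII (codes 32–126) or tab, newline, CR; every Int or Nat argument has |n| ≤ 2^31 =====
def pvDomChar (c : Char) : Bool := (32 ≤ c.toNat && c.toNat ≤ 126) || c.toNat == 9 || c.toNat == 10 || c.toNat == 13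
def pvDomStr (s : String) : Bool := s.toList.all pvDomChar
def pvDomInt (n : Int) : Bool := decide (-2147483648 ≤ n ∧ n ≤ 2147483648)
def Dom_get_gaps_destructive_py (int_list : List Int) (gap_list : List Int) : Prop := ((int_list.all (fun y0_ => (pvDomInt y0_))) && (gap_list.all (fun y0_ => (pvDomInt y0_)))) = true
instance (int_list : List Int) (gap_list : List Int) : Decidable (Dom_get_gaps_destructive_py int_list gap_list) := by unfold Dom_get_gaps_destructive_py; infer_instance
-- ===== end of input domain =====

-- B replaces A's pop(0) tail recursion by one bulk zip-with-tail extend (simpler);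
-- both Pythons also mutate int_list/gap_list identically — the theorems here are about the RETURN value only.
-- ===== PORT A =====
-- literal port of A's recursion: len==1 -> gap_list; len>1 -> append int_list[1]-int_list[0], pop(0), recurse;
-- the [] case raises ValueError in Python and is excluded by Pre_ (the port returns gap_list there, unclaimed).
def get_gaps_destructive_py : List Int → List Int → List Int
  | [_], gap_list => gap_list
  | a :: b :: rest, gap_list => get_gaps_destructive_py (b :: rest) (gap_list ++ [b - a])
  | [], gap_list => gap_list  -- unreachable under Pre_

-- ===== PORT B =====
-- port of Source B: gap_list.extend(b-a for a,b in zip(int_list, int_list[1:])); empty input raises (excluded by Pre_)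
def get_gaps_destructive_py_alt (int_list : List Int) (gap_list : List Int) : List Int :=
  gap_list ++ ((int_list.zip (PySem.List.slice int_list (some 1) none)).map (fun p => p.2 - p.1))

-- ===== PRECONDITION & SPEC =====
-- Pre_ excludes exactly the empty int_list, on which both Pythons raise ValueError.
def Pre_get_gaps_destructive_py (int_list : List Int) (gap_list : List Int) : Prop := int_list ≠ []
instance (int_list : List Int) (gap_list : List Int) : Decidable (Pre_get_gaps_destructive_py int_list gap_list) := by unfold Pre_get_gaps_destructive_py; infer_instance
def pvWitness_get_gaps_destructive_py : List Int × List Int := ([1, 4, 2], [7])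
def Spec_get_gaps_destructive_py (int_list : List Int) (gap_list : List Int) (out : List Int) : Prop := out = get_gaps_destructive_py_alt int_list gap_list
instance (int_list : List Int) (gap_list : List Int) (out : List Int) : Decidable (Spec_get_gaps_destructive_py int_list gap_list out) := by unfold Spec_get_gaps_destructive_py; infer_instance

-- ===== CLAIM (what is proved, stated in full; the proofs are below) =====
def Claim_equal_get_gaps_destructive_py : Prop := ∀ (int_list : List Int) (gap_list : List Int), Dom_get_gaps_destructive_py int_list gap_list → Pre_get_gaps_destructive_py int_list gap_list → Spec_get_gaps_destructive_py int_list gap_list (get_gaps_destructive_py int_list gap_list)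

-- ===== LEMMAS AND PROOFS =====

-- ===== VERDICT (by name: the statement is the Claim_ definition above) =====
-- loop invariant of A's recursion: it appends the consecutive differences of int_list to gap_list
theorem getGaps_eq_zipDiffs (int_list : List Int) (gap_list : List Int) :
    get_gaps_destructive_py int_list gap_list =
      gap_list ++ ((int_list.zip (int_list.drop 1)).map (fun p => p.2 - p.1)) := by
  induction int_list generalizing gap_list with
  | nil => simp [get_gaps_destructive_py]
  | cons a t ih =>
    cases t with
    | nil => simp [get_gaps_destructive_py]
    | cons b rest =>
      simp [get_gaps_destructive_py, ih]

theorem get_gaps_destructive_py_spec : Claim_equal_get_gaps_destructive_py := by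
  intro int_list gap_list _ _
  unfold Spec_get_gaps_destructive_py get_gaps_destructive_py_alt
  rw [getGaps_eq_zipDiffs]
  simp [PySem.List.slice_from_one]
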